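-- pv_equiv track=rewrite | github.com/pikalab-unibo/jlc-experiments-2022 | utils.py | get_neurons_per_layer
-- ===== SOURCE A (Python) =====
-- import math
--
-- def get_neurons_per_layer(input_shape, output_shape) -> list[int]:
--     neurons_per_layer = []
--     depth = math.floor(math.log10(input_shape))
--     first_hidden_layer_neurons = math.ceil(math.log2(input_shape))**2
--     neurons_per_layer.append(first_hidden_layer_neurons)
--     last_layer_neurons = first_hidden_layer_neurons
--     for _ in range(depth-1):
--         last_layer_neurons /= 2
--         neurons_per_layer.append(int(last_layer_neurons))
--     neurons_per_layer.append(output_shape)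
--     return neurons_per_layer
-- ===== SOURCE B (Python) =====
-- def get_neurons_per_layer(input_shape, output_shape) -> list[int]:
--     # first hidden width = square of the bit length of input_shape-1 (= ceil(log2(input_shape))**2)
--     h = (input_shape - 1).bit_length() ** 2
--     # number of hidden layers = decimal digit count of input_shape minus one, at least 1
--     d = max(len(str(input_shape)) - 1, 1)
--
--     def layers(i):
--         # hidden layers i..d-1 (each one a direct bit shift of h), then the output layer
--         return [output_shape] if i == d else [h >> i] + layers(i + 1)
--
--     return layers(0)
-- ===== Notes on version B (the rewrite author's own statement) =====
-- stated objective: alternative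
-- what changed: B drops A's float logs and stateful halving loop: it takes the bit length of input_shape-1 for the first width, counts decimal digits via str() for the layer count, and builds the list by recursion, each hidden layer computed independently as a bit shift h >> i instead of threading a halved float accumulator.
import Mathlib
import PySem

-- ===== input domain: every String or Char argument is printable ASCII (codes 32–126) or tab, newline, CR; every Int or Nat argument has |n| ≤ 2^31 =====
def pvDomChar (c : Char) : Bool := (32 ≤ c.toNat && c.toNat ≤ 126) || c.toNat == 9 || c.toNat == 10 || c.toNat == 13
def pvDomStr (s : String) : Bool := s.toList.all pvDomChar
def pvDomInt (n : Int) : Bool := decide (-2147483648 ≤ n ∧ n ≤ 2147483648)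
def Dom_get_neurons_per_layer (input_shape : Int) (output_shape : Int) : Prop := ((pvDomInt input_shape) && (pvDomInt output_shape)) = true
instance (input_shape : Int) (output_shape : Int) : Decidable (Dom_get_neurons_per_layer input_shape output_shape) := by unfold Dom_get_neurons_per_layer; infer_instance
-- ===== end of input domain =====

-- B replaces A's float logs and stateful float-halving loop by integer bit length, a decimal
-- digit count via str(), and a recursion computing each hidden layer directly as a bit shift;
-- equal on input_shape ≥ 1 (A raises ValueError otherwise).


-- ===== PORT A =====
-- Hand port of math.floor(math.log10(n)) for n ≥ 1: the largest k with 10^k ≤ n, found by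
-- incrementing k while 10^(k+1) ≤ n. Exact for 1 ≤ n ≤ 2^31 (CPython's double log10 is
-- exact there); fuel 40 suffices since n < 10^40.
def pvLog10Loop (n : Int) : Nat → Nat → Nat
  | 0, k => k
  | fuel + 1, k => if (10 : Int) ^ (k + 1) ≤ n then pvLog10Loop n fuel (k + 1) else k

-- Hand port of math.ceil(math.log2(n)) for n ≥ 1: the least k with n ≤ 2^k. Exact for
-- 1 ≤ n ≤ 2^31; fuel 40 suffices since n < 2^40.
def pvLog2Loop (n : Int) : Nat → Nat → Nat
  | 0, k => k
  | fuel + 1, k => if n ≤ (2 : Int) ^ k then k else pvLog2Loop n fuel (k + 1)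

def get_neurons_per_layer (input_shape : Int) (output_shape : Int) : List Int :=
  let depth : Int := (pvLog10Loop input_shape 40 0 : Nat)
  let first_hidden_layer_neurons : Int := ((pvLog2Loop input_shape 40 0 : Nat) : Int) ^ 2
  -- last_layer_neurons is a Python float; every value it takes here is an exactly
  -- representable dyadic rational, so it is tracked as ℚ; int() of this nonnegative
  -- value is ⌊·⌋.
  let res := (PySem.List.pyRange 0 (depth - 1) 1).foldl
      (fun (st : List Int × ℚ) _ =>
        let last := st.2 / 2
        (st.1 ++ [⌊last⌋], last))
      ([first_hidden_layer_neurons], (first_hidden_layer_neurons : ℚ))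
  res.1 ++ [output_shape]

-- ===== PORT B =====
-- The recursive helper 'layers(i)' of Source B: structural recursion on the number of hidden
-- layers still to emit (c = d - i); Python's base case 'i == d' is c = 0. Python's 'h >> i'
-- is Lean's 'h >>> i'.
def pvLayers (h o : Int) : Nat → Nat → List Int
  | _, 0 => [o]
  | i, c + 1 => (h >>> i) :: pvLayers h o (i + 1) c

def get_neurons_per_layer_alt (input_shape : Int) (output_shape : Int) : List Int :=
  let h : Int := ((PySem.Int.bitLength (input_shape - 1) : Nat) : Int) ^ 2
  let d : Int := max (PySem.Str.len (PySem.Int.toStr input_shape) - 1) 1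
  pvLayers h output_shape 0 d.toNat

-- ===== PRECONDITION & SPEC =====
-- Pre_ excludes exactly input_shape ≤ 0, where A raises ValueError (math.log10 domain error).
def Pre_get_neurons_per_layer (input_shape : Int) (output_shape : Int) : Prop :=
  1 ≤ input_shape
instance (input_shape : Int) (output_shape : Int) : Decidable (Pre_get_neurons_per_layer input_shape output_shape) := by unfold Pre_get_neurons_per_layer; infer_instance
def pvWitness_get_neurons_per_layer : Int × Int := (1000, 7)

def Spec_get_neurons_per_layer (input_shape : Int) (output_shape : Int) (out : List Int) : Prop := out = get_neurons_per_layer_alt input_shape output_shape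
instance (input_shape : Int) (output_shape : Int) (out : List Int) : Decidable (Spec_get_neurons_per_layer input_shape output_shape out) := by unfold Spec_get_neurons_per_layer; infer_instance

-- ===== CLAIM (what is proved, stated in full; the proofs are below) =====
def Claim_equal_get_neurons_per_layer : Prop := ∀ (input_shape : Int) (output_shape : Int), Dom_get_neurons_per_layer input_shape output_shape → Pre_get_neurons_per_layer input_shape output_shape → Spec_get_neurons_per_layer input_shape output_shape (get_neurons_per_layer input_shape output_shape)

-- ===== LEMMAS AND PROOFS =====

-- A's ceil-log2 search computes Nat.size (n-1).toNat for n ≥ 1.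
theorem pvLog2Loop_eq (n : Int) (hn : 1 ≤ n) : ∀ fuel k : Nat,
    k ≤ Nat.size (n-1).toNat → Nat.size (n-1).toNat ≤ k + fuel →
    pvLog2Loop n fuel k = Nat.size (n-1).toNat := by
  intro fuel
  induction fuel with
  | zero => intro k h1 h2; rw [pvLog2Loop]; omega
  | succ f ih =>
    intro k h1 h2
    have hcast : ((2^k : Nat) : Int) = (2:Int)^k := by push_cast; ring
    rw [pvLog2Loop]
    by_cases hc : n ≤ (2:Int)^k
    · rw [if_pos hc]
      have hlt : (n-1).toNat < 2^k := by omega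
      have := Nat.size_le.2 hlt
      omega
    · rw [if_neg hc]
      apply ih
      · have hc2 : 2^k ≤ (n-1).toNat := by omega
        have := Nat.lt_size.2 hc2
        omega
      · omega

-- A's floor-log10 search computes Nat.log 10 n.toNat for n ≥ 1.
theorem pvLog10Loop_eq (n : Int) (hn : 1 ≤ n) : ∀ fuel k : Nat,
    k ≤ Nat.log 10 n.toNat → Nat.log 10 n.toNat ≤ k + fuel →
    pvLog10Loop n fuel k = Nat.log 10 n.toNat := by
  intro fuel
  induction fuel with
  | zero => intro k h1 h2; rw [pvLog10Loop]; omega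
  | succ f ih =>
    intro k h1 h2
    have hcast : ((10^(k+1) : Nat) : Int) = (10:Int)^(k+1) := by push_cast; ring
    have hiff : ((10:Int)^(k+1) ≤ n) ↔ k+1 ≤ Nat.log 10 n.toNat := by
      constructor
      · intro h
        exact (Nat.le_log_iff_pow_le (by norm_num) (by omega)).2 (by omega)
      · intro h
        have := (Nat.le_log_iff_pow_le (b := 10) (x := k+1) (y := n.toNat)
          (by norm_num) (by omega)).1 h
        omega
    rw [pvLog10Loop]
    by_cases hc : (10:Int)^(k+1) ≤ n
    · rw [if_pos hc]; exact ih (k+1) (hiff.1 hc) (by omega)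
    · rw [if_neg hc]
      have : Nat.log 10 n.toNat ≤ k := by
        by_contra hk; exact hc (hiff.2 (by omega))
      omega

-- B's bitLength agrees with Nat.size on the nonnegative input it is applied to.
theorem bitLength_eq_size (m : Int) (hm : 0 ≤ m) :
    PySem.Int.bitLength m = Nat.size m.toNat := by
  rcases eq_or_lt_of_le hm with h0 | hpos
  · simp [← h0]
  · have hub := PySem.Int.lt_two_pow_bitLength m
    have hlb := PySem.Int.two_pow_bitLength_le m (by omega)
    have hna : m.natAbs = m.toNat := by omega
    rw [hna] at hub hlb
    have hb1 : 1 ≤ PySem.Int.bitLength m := by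
      by_contra hb
      have : PySem.Int.bitLength m = 0 := by omega
      rw [this] at hub; omega
    apply le_antisymm
    · have := Nat.lt_size.2 hlb; omega
    · exact Nat.size_le.2 hub

-- Exact length of Nat.toDigitsCore with enough fuel: one char per decimal digit.
theorem toDigitsCore_length_eq : ∀ (f n : Nat) (l : List Char), Nat.log 10 n < f →
    (Nat.toDigitsCore 10 f n l).length = Nat.log 10 n + 1 + l.length := by
  intro f
  induction f with
  | zero => intro n l h; omega
  | succ f ih =>
    intro n l h
    rw [Nat.toDigitsCore]
    by_cases hz : n / 10 = 0
    · have hn10 : n < 10 := by omega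
      have hlog : Nat.log 10 n = 0 := Nat.log_eq_zero_iff.2 (Or.inl hn10)
      simp [hz, hlog]
      omega
    · have hge : 10 ≤ n := by
        by_contra hlt; exact hz (Nat.div_eq_of_lt (by omega))
      have hlogpos : 0 < Nat.log 10 n := Nat.log_pos (by norm_num) hge
      have hlogdiv : Nat.log 10 (n / 10) = Nat.log 10 n - 1 := Nat.log_div_base 10 n
      simp only [hz, if_false]
      rw [ih (n / 10) _ (by omega)]
      simp only [List.length_cons, hlogdiv]
      omega

-- str(n) of a positive n has log10(n)+1 characters.
theorem toChars_length (n : Int) (hn : 1 ≤ n) :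
    (PySem.Int.toChars n).length = Nat.log 10 n.toNat + 1 := by
  rw [PySem.Int.toChars, if_neg (by omega)]
  rw [Nat.toDigits, toDigitsCore_length_eq (n.toNat + 1) n.toNat []
    (by have := Nat.log_le_self 10 n.toNat; omega)]
  simp

-- B's recursion unfolds to a map over the layer indices followed by the output layer.
theorem pvLayers_eq (h o : Int) : ∀ (c i : Nat),
    pvLayers h o i c = (List.range c).map (fun j => h >>> (i + j)) ++ [o] := by
  intro c
  induction c with
  | zero => intro i; simp [pvLayers]
  | succ c ih =>
    intro i
    rw [pvLayers, ih (i+1), List.range_succ_eq_map]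
    simp [List.map_map, Function.comp_def, Nat.add_comm, Nat.add_left_comm]

-- After L iterations A's halving loop holds [h] ++ the directly computed layers.
theorem haltLoop_eq (h : Int) (L : Nat) :
    (List.range L).foldl
      (fun (st : List Int × ℚ) _ => ((st.1 ++ [⌊st.2 / 2⌋], st.2 / 2) : List Int × ℚ))
      ([h], (h : ℚ))
    = ([h] ++ (List.range L).map (fun i => ⌊(h : ℚ) / 2 ^ (i + 1)⌋), (h : ℚ) / 2 ^ L) := by
  induction L with
  | zero => simp
  | succ L ih =>
    rw [List.range_succ, List.foldl_append, ih]
    simp only [List.foldl_cons, List.foldl_nil, List.map_append, List.map_cons, List.map_nil]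
    rw [Prod.mk.injEq]
    refine ⟨?_, by rw [div_div, ← pow_succ]⟩
    simp [div_div, ← pow_succ]

-- Both programs' layer values coincide: A's ⌊(s² : ℚ)/2^j⌋ is B's (s² : Int) >>> j.
theorem layer_val_eq (s j : Nat) :
    ⌊(((s : Int)^2 : Int) : ℚ) / 2 ^ j⌋ = ((s : Int))^2 >>> j := by
  have hcast : ((s : Int))^2 = ((s^2 : Nat) : Int) := by push_cast; ring
  rw [hcast]
  have hshift : ((s^2 : Nat) : Int) >>> j = ((s^2 >>> j : Nat) : Int) := rfl
  rw [hshift, Nat.shiftRight_eq_div_pow]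
  have h2 : ((2:ℚ)) ^ j = ((2^j : Nat) : ℚ) := by push_cast; ring
  rw [h2, Rat.floor_intCast_div_natCast]
  rw [Int.natCast_div]

theorem main_eq (i o : Int) (hd : -2147483648 ≤ i ∧ i ≤ 2147483648) (hp : 1 ≤ i) :
    get_neurons_per_layer i o = get_neurons_per_layer_alt i o := by
  obtain ⟨hlo, hhi⟩ := hd
  set s := Nat.size (i-1).toNat with hs
  set D := Nat.log 10 i.toNat with hD
  have hsle : s ≤ 40 := by
    rw [hs]
    have : (i-1).toNat < 2^40 := by norm_num; omega
    exact Nat.size_le.2 this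
  have hDle : D ≤ 40 := by
    by_contra hgt
    have := (Nat.le_log_iff_pow_le (b := 10) (x := 41) (y := i.toNat)
      (by norm_num) (by omega)).1 (by omega)
    norm_num at this; omega
  have h2 : pvLog2Loop i 40 0 = s := pvLog2Loop_eq i hp 40 0 (by omega) (by omega)
  have h10 : pvLog10Loop i 40 0 = D := pvLog10Loop_eq i hp 40 0 (by omega) (by omega)
  have hbit : PySem.Int.bitLength (i - 1) = s := by
    rw [bitLength_eq_size (i-1) (by omega)]
  have hlen : PySem.Str.len (PySem.Int.toStr i) - 1 = (D : Int) := by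
    rw [PySem.Str.len_eq, PySem.Int.toList_toStr, toChars_length i hp]
    push_cast; ring
  unfold get_neurons_per_layer get_neurons_per_layer_alt
  simp only [h2, h10, hbit, hlen]
  set h : Int := ((s : Int))^2 with hh
  rw [PySem.List.pyRange_one]
  rw [List.foldl_map]
  have hcnt : ((D : Int) - 1 - 0).toNat = D - 1 := by omega
  rw [hcnt, haltLoop_eq h (D - 1)]
  rw [pvLayers_eq]
  rcases Nat.eq_zero_or_pos D with h0 | hpos
  · simp only [h0]
    norm_num
  · have hmax : (max (D : Int) 1).toNat = D := by omega
    rw [hmax]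
    have hDsucc : D = (D - 1) + 1 := by omega
    rw [hDsucc, List.range_succ_eq_map]
    simp only [List.map_cons, List.map_map, Nat.add_sub_cancel, List.cons_append]
    refine congrArg₂ List.cons ?_ ?_
    · simp
    · simp only [List.nil_append]
      refine congrArg (· ++ [o]) ?_
      apply List.map_congr_left
      intro k _
      simp only [Function.comp_apply, Nat.zero_add]
      exact layer_val_eq s (k + 1)

-- ===== VERDICT (by name: the statement is the Claim_ definition above) =====
theorem get_neurons_per_layer_spec : Claim_equal_get_neurons_per_layer := by
  intro i o hdom hpre
  unfold Spec_get_neurons_per_layer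
  unfold Dom_get_neurons_per_layer pvDomInt at hdom
  simp only [Bool.and_eq_true, decide_eq_true_eq] at hdom
  exact main_eq i o hdom.1 hpre
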